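-- pv_equiv track=rewrite | github.com/clamsproject/aapb-annenv-role-filler-binder | raw_annotation_iaa_assessment/src/rfb_agreement.py | assoc_pairs
-- ===== SOURCE A (Python) =====
-- from typing import Dict, List, Tuple, Union
--
-- def assoc_pairs(anno_one: Dict[str, List[str]],
--                 anno_two: Dict[str, List[str]]):
--     """Associate Pairs
--
--     Generates a set of tuples for each annotation in
--     the document, and sorts them by key.
--
--     ## Args
--     - anno_one : dictionary of annotator_A's annotations
--     - anno_two : dictionary of annotator_B's annotations
--
--     ## Returns
--     - tuple of lists, each consisting of tuples representing kv pairs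
--     """
--     a_pairs = []
--     b_pairs = []
--
--     for key, vals in anno_one.items():
--         if len(vals) == 1:
--             a_pairs.append((key, vals[0]))
--         else:
--             a_pairs.extend((key, v) for v in vals)
--     for key, vals in anno_two.items():
--         if len(vals) == 1:
--             b_pairs.append((key, vals[0]))
--         else:
--             b_pairs.extend((key, v) for v in vals)
--     a_pairs.sort(key = lambda x: x[0])
--     b_pairs.sort(key = lambda x: x[0])
--     return a_pairs, b_pairs
-- ===== SOURCE B (Python) =====
-- def assoc_pairs(anno_one, anno_two):
--     def flat_sorted(anno):
--         pairs = []
--         for key in sorted(anno):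
--             for v in anno[key]:
--                 pairs.append((key, v))
--         return pairs
--     return flat_sorted(anno_one), flat_sorted(anno_two)
-- ===== Notes on version B (the rewrite author's own statement) =====
-- stated objective: simpler
-- what changed: Instead of flattening each dict to a pair list and stably sorting the pairs at the end, B sorts the (unique) keys first and emits each key's values in one pass over the sorted keys, with no pair sort and no len(vals)==1 special case.
import Mathlib
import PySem

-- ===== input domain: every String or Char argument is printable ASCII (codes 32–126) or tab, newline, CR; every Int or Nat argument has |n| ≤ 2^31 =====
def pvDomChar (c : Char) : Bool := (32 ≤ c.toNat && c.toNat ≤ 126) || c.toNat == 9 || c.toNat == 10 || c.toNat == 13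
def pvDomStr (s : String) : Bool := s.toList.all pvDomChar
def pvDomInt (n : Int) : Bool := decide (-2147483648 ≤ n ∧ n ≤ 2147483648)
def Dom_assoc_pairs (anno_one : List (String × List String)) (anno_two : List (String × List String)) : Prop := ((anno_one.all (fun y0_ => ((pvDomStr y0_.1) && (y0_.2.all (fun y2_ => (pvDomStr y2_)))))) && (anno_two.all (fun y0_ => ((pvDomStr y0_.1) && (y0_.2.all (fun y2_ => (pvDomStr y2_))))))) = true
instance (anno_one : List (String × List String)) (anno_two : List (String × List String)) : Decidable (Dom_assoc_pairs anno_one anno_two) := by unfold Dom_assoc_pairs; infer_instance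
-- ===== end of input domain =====

-- B simplifies A: it sorts the (unique) dict keys once and emits each key's values in
-- one pass over the sorted keys, instead of flattening to pairs and stably sorting the
-- pairs at the end (the len(vals)==1 branch of A is also dropped as redundant).

-- ===== PORT A =====
-- one iteration of A's flattening loop: the len(vals)==1 branch, then the extend branch
def pvEmit (acc : List (String × String)) (kv : String × List String) : List (String × String) :=
  match kv.2 with
  | [v] => acc ++ [(kv.1, v)]
  | vs  => acc ++ vs.map (fun v => (kv.1, v))

def assoc_pairs (anno_one : List (String × List String)) (anno_two : List (String × List String)) : (List (String × String)) × (List (String × String)) :=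
  let a_pairs := anno_one.foldl pvEmit []
  let b_pairs := anno_two.foldl pvEmit []
  (PySem.List.sorted a_pairs (fun x => x.1) false,
   PySem.List.sorted b_pairs (fun x => x.1) false)

-- ===== PORT B =====
-- B's helper flat_sorted: iterate over sorted(anno); anno[key] is the dict lookup
def pvFlatSorted (anno : List (String × List String)) : List (String × String) :=
  (PySem.List.sorted (anno.map Prod.fst) (fun k => k) false).flatMap
    (fun k => ((PySem.Dict.mk anno).getD k []).map (fun v => (k, v)))

def assoc_pairs_alt (anno_one : List (String × List String)) (anno_two : List (String × List String)) : (List (String × String)) × (List (String × String)) :=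
  (pvFlatSorted anno_one, pvFlatSorted anno_two)

-- ===== PRECONDITION & SPEC =====
-- Pre_ requires the keys of each association list to be distinct: the Python arguments
-- are dicts, whose keys are necessarily unique, so a duplicate-key list corresponds to
-- no Python input at all; no input A accepts is excluded.
def Pre_assoc_pairs (anno_one : List (String × List String)) (anno_two : List (String × List String)) : Prop :=
  (anno_one.map Prod.fst).Nodup ∧ (anno_two.map Prod.fst).Nodup
instance (anno_one : List (String × List String)) (anno_two : List (String × List String)) : Decidable (Pre_assoc_pairs anno_one anno_two) := by unfold Pre_assoc_pairs; infer_instance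

def pvWitness_assoc_pairs : (List (String × List String)) × (List (String × List String)) :=
  ([("b", ["1", "2"]), ("a", ["3"])], [("c", [])])

def Spec_assoc_pairs (anno_one : List (String × List String)) (anno_two : List (String × List String)) (out : (List (String × String)) × (List (String × String))) : Prop := out = assoc_pairs_alt anno_one anno_two
instance (anno_one : List (String × List String)) (anno_two : List (String × List String)) (out : (List (String × String)) × (List (String × String))) : Decidable (Spec_assoc_pairs anno_one anno_two out) := by unfold Spec_assoc_pairs; infer_instance

-- ===== CLAIM (what is proved, stated in full; the proofs are below) =====
def Claim_equal_assoc_pairs : Prop := ∀ (anno_one : List (String × List String)) (anno_two : List (String × List String)), Dom_assoc_pairs anno_one anno_two → Pre_assoc_pairs anno_one anno_two → Spec_assoc_pairs anno_one anno_two (assoc_pairs anno_one anno_two)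

-- ===== LEMMAS AND PROOFS =====

theorem pvEmit_eq (acc : List (String × String)) (kv : String × List String) :
    pvEmit acc kv = acc ++ kv.2.map (fun v => (kv.1, v)) := by
  rcases kv with ⟨k, _ | ⟨v, _ | ⟨w, t⟩⟩⟩ <;> simp [pvEmit]

theorem foldl_pvEmit (l : List (String × List String)) (acc : List (String × String)) :
    l.foldl pvEmit acc = acc ++ l.flatMap (fun kv => kv.2.map (fun v => (kv.1, v))) := by
  induction l generalizing acc with
  | nil => simp
  | cons kv t ih => simp [List.foldl_cons, pvEmit_eq, ih]

theorem ib_cons_of_before {α : Type} (bf : α → α → Bool) (x y : α) (ys : List α)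
    (h : bf x y = true) : PySem.List.insertBy bf x (y :: ys) = x :: y :: ys := by
  simp [PySem.List.insertBy, h]

theorem ib_of_forall_before {α : Type} (bf : α → α → Bool) (x : α) (zs : List α)
    (h : ∀ y ∈ zs, bf x y = true) : PySem.List.insertBy bf x zs = x :: zs := by
  cases zs with
  | nil => simp [PySem.List.insertBy]
  | cons y ys => exact ib_cons_of_before bf x y ys (h y (by simp))

theorem ib_append_skip {α : Type} (bf : α → α → Bool) (x : α) (a b : List α)
    (h : ∀ y ∈ a, bf x y = false) :
    PySem.List.insertBy bf x (a ++ b) = a ++ PySem.List.insertBy bf x b := by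
  induction a with
  | nil => simp
  | cons y a' ih =>
      have hy : bf x y = false := h y (by simp)
      simp only [List.cons_append, PySem.List.insertBy, hy]
      simp [ih (fun z hz => h z (by simp [hz]))]

theorem flatMap_ext_mem {α β : Type} {l : List α} {f g : α → List β}
    (h : ∀ a ∈ l, f a = g a) : l.flatMap f = l.flatMap g := by
  induction l with
  | nil => rfl
  | cons a t ih =>
      simp only [List.flatMap_cons, h a (by simp), ih (fun b hb => h b (by simp [hb]))]

theorem ins_blocks (x : String × String) (f : String → List (String × String)) :
    ∀ ks : List String, ks.Pairwise (· < ·) → x.1 ∈ ks →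
      (∀ k ∈ ks, ∀ y ∈ f k, y.1 = k) →
      PySem.List.insertBy (fun a b => decide (a.1 < b.1)) x (ks.flatMap f)
        = ks.flatMap (fun k => f k ++ if x.1 == k then [x] else []) := by
  intro ks
  induction ks with
  | nil => intro _ hx; cases hx
  | cons k ks' ih =>
      intro hpw hx hf
      have hpw' : ks'.Pairwise (· < ·) := hpw.of_cons
      have hhead : ∀ k' ∈ ks', k < k' := fun k' hk' => List.rel_of_pairwise_cons hpw hk'
      by_cases hk : x.1 = k
      · have hskip : ∀ y ∈ f k, (fun a b : String × String => decide (a.1 < b.1)) x y = false := by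
          intro y hy
          have := hf k (by simp) y hy
          simp only [this, hk, decide_eq_false_iff_not]
          exact lt_irrefl k
        have hlower : ∀ y ∈ ks'.flatMap f,
            (fun a b : String × String => decide (a.1 < b.1)) x y = true := by
          intro y hy
          rcases List.mem_flatMap.mp hy with ⟨k', hk', hyk⟩
          have := hf k' (by simp [hk']) y hyk
          simp only [this, hk, decide_eq_true_eq]
          exact hhead k' hk'
        have hrest : ks'.flatMap (fun k' => f k' ++ if x.1 == k' then [x] else [])
            = ks'.flatMap f := by
          apply flatMap_ext_mem
          intro k' hk'
          have hne : (x.1 == k') = false := by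
            have := hhead k' hk'
            simp only [beq_eq_false_iff_ne, hk]
            exact ne_of_lt this
          simp [hne]
        simp only [List.flatMap_cons]
        rw [ib_append_skip _ _ _ _ hskip, ib_of_forall_before _ _ _ hlower, hrest]
        have hxk : (x.1 == k) = true := by simp [hk]
        simp [hxk]
      · have hx' : x.1 ∈ ks' := by
          rcases List.mem_cons.mp hx with h | h
          · exact absurd h hk
          · exact h
        have hkx : k < x.1 := hhead _ hx'
        have hskip : ∀ y ∈ f k, (fun a b : String × String => decide (a.1 < b.1)) x y = false := by
          intro y hy
          have := hf k (by simp) y hy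
          simp only [this, decide_eq_false_iff_not]
          exact not_lt.mpr hkx.le
        simp only [List.flatMap_cons]
        rw [ib_append_skip _ _ _ _ hskip,
          ih hpw' hx' (fun k' hk' => hf k' (by simp [hk']))]
        have hne : (x.1 == k) = false := by
          simp
          exact fun h => hk h
        simp [hne]

theorem sorted_blocks (ks : List String) (hpw : ks.Pairwise (· < ·)) :
    ∀ xs : List (String × String), (∀ x ∈ xs, x.1 ∈ ks) →
      PySem.List.sorted xs (fun p => p.1) false
        = ks.flatMap (fun k => xs.filter (fun p => p.1 == k)) := by
  intro xs
  induction xs using List.reverseRecOn with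
  | nil => simp [PySem.List.sorted_eq_foldl_insertBy]
  | append_singleton ys x ih =>
      intro hmem
      have hins : PySem.List.sorted (ys ++ [x]) (fun p => p.1) false
          = PySem.List.insertBy (fun a b => decide (a.1 < b.1)) x
              (PySem.List.sorted ys (fun p => p.1) false) := by
        rw [PySem.List.sorted_eq_foldl_insertBy, PySem.List.sorted_eq_foldl_insertBy,
          List.foldl_append]
        rfl
      rw [hins, ih (fun y hy => hmem y (by simp [hy])),
        ins_blocks x _ ks hpw (hmem x (by simp))
          (fun k _ y hy => by
            have := List.of_mem_filter hy
            exact eq_of_beq this)]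
      apply flatMap_ext_mem
      intro k _
      rw [List.filter_append]
      congr 1
      by_cases hc : (x.1 == k) = true <;> simp [hc]

theorem filter_flat (k : String) :
    ∀ l : List (String × List String), (l.map Prod.fst).Nodup →
      (l.flatMap (fun kv => kv.2.map (fun v => (kv.1, v)))).filter (fun p => p.1 == k)
        = ((PySem.Dict.mk l).getD k []).map (fun v => (k, v)) := by
  intro l
  induction l with
  | nil => simp [PySem.Dict.getD, PySem.Dict.get?]
  | cons kv rest ih =>
      intro hnd
      rcases kv with ⟨k', vs⟩
      have hnd' : (rest.map Prod.fst).Nodup := (List.nodup_cons.mp hnd).2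
      have hknotin : k' ∉ rest.map Prod.fst := (List.nodup_cons.mp hnd).1
      simp only [List.flatMap_cons, List.filter_append]
      by_cases h : k' = k
      · subst h
        have h1 : (vs.map (fun v => (k', v))).filter (fun p => p.1 == k') = vs.map (fun v => (k', v)) := by
          apply List.filter_eq_self.mpr
          intro p hp
          rcases List.mem_map.mp hp with ⟨v, _, rfl⟩
          simp
        have h2 : (rest.flatMap (fun kv => kv.2.map (fun v => (kv.1, v)))).filter (fun p => p.1 == k') = [] := by
          apply List.filter_eq_nil_iff.mpr
          intro p hp
          rcases List.mem_flatMap.mp hp with ⟨⟨k2, vs2⟩, hk2, hp2⟩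
          rcases List.mem_map.mp hp2 with ⟨v, _, rfl⟩
          simp only [beq_iff_eq]
          intro hcontra
          exact hknotin (by
            simp only [List.mem_map]
            exact ⟨(k2, vs2), hk2, hcontra⟩)
        rw [h1, h2]
        simp [PySem.Dict.getD, PySem.Dict.get?_mk_cons]
      · have h1 : (vs.map (fun v => (k', v))).filter (fun p => p.1 == k) = [] := by
          apply List.filter_eq_nil_iff.mpr
          intro p hp
          rcases List.mem_map.mp hp with ⟨v, _, rfl⟩
          simp [h]
        have hne : (k' == k) = false := by simp [h]
        rw [h1]
        simp only [List.nil_append]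
        rw [ih hnd']
        simp [PySem.Dict.getD, PySem.Dict.get?_mk_cons, hne]

theorem sortedKeys_pairwise_lt (l : List (String × List String))
    (h : (l.map Prod.fst).Nodup) :
    (PySem.List.sorted (l.map Prod.fst) (fun k => k) false).Pairwise (· < ·) := by
  have h2 : (PySem.List.sorted (l.map Prod.fst) (fun k => k) false).Pairwise
      (fun a b => a ≤ b) := PySem.List.sorted_pairwise (l.map Prod.fst) (fun k => k)
  have h3 : (PySem.List.sorted (l.map Prod.fst) (fun k => k) false).Nodup :=
    ((PySem.List.sorted_perm (l.map Prod.fst) (fun k => k) false).nodup_iff).mpr h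
  exact (h2.and h3).imp (fun hab => lt_of_le_of_ne hab.1 hab.2)

theorem one_side (l : List (String × List String)) (h : (l.map Prod.fst).Nodup) :
    PySem.List.sorted (l.foldl pvEmit []) (fun p => p.1) false = pvFlatSorted l := by
  rw [foldl_pvEmit]
  simp only [List.nil_append]
  rw [sorted_blocks (PySem.List.sorted (l.map Prod.fst) (fun k => k) false)
      (sortedKeys_pairwise_lt l h)
      (l.flatMap (fun kv => kv.2.map (fun v => (kv.1, v))))
      (by
        intro x hx
        rcases List.mem_flatMap.mp hx with ⟨⟨k2, vs2⟩, hk2, hp2⟩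
        rcases List.mem_map.mp hp2 with ⟨v, _, rfl⟩
        rw [PySem.List.mem_sorted]
        simp only [List.mem_map]
        exact ⟨(k2, vs2), hk2, rfl⟩)]
  unfold pvFlatSorted
  exact flatMap_ext_mem (fun k _ => filter_flat k l h)

-- ===== VERDICT (by name: the statement is the Claim_ definition above) =====
theorem assoc_pairs_spec : Claim_equal_assoc_pairs := by
  intro anno_one anno_two _ hpre
  unfold Spec_assoc_pairs assoc_pairs assoc_pairs_alt
  simp only []
  exact Prod.ext (one_side anno_one hpre.1) (one_side anno_two hpre.2)
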